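-- pv_equiv track=rewrite | github.com/David-Nevezi-Strango/Cryptool | cipher.py | rc4_key_process
-- ===== SOURCE A (Python) =====
-- def rc4_key_process(key: str) -> list:
--     result = list()
--     res_index = 0
--     while (res_index != 256):
--         count = 0
--         for char in key:
--             result.append(ord(char))
--             count += 1
--             if (len(result) == 256):
--                 break
--         res_index += count
--     return result
-- ===== SOURCE B (Python) =====
-- def rc4_key_process(key: str) -> list:
--     n = len(key)
--     return [ord(key[i % n]) for i in range(256)]
-- ===== Notes on version B (the rewrite author's own statement) =====
-- stated objective: simpler
-- what changed: B computes each of the 256 output positions directly by the closed-form index ord(key[i % len(key)]) instead of A's repeat-the-key fill loop with a break and a manually maintained counter.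
import Mathlib
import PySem

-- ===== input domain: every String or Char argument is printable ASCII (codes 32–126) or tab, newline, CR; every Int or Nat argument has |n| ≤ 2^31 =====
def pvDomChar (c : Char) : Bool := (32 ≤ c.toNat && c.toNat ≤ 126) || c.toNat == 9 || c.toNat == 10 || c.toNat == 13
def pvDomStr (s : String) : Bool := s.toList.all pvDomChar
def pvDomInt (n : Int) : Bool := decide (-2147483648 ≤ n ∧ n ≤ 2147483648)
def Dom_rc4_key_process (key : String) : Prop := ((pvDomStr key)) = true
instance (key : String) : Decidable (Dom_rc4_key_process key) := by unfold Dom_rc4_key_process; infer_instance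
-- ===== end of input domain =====

-- B computes each output position by the closed form ord(key[i % len(key)]) over range(256),
-- replacing A's repeat-the-key fill loop; equivalence is on the return value, for nonempty keys.

-- ===== PORT A =====
-- inner 'for char in key' loop: appends ord(char), counts, breaks when len(result) == 256
def pvInnerA (chars : List Char) (result : List Int) (count : Int) : List Int × Int :=
  match chars with
  | [] => (result, count)
  | c :: rest =>
      let r := result ++ [(c.toNat : Int)]
      let cnt := count + 1
      if r.length = 256 then (r, cnt) else pvInnerA rest r cnt

-- outer 'while res_index != 256' loop; Python diverges when key = "" (excluded by Pre_),
-- otherwise each pass grows res_index by ≥ 1, so fuel 257 is exact on the admitted domain.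
def pvOuterA (fuel : Nat) (result : List Int) (res_index : Int) (key : List Char) : List Int :=
  match fuel with
  | 0 => result
  | fuel + 1 =>
      if res_index = 256 then result
      else
        let p := pvInnerA key result 0
        pvOuterA fuel p.1 (res_index + p.2) key

def rc4_key_process (key : String) : List Int :=
  pvOuterA 257 [] 0 key.toList

-- ===== PORT B =====
-- '[ord(key[i % n]) for i in range(256)]'; key[i % n] raises only for n = 0 (empty key,
-- excluded by Pre_), so the 'none' branch of pyGet? is a pure totality guard.
def rc4_key_process_alt (key : String) : List Int :=
  (PySem.List.pyRange 0 256 1).map (fun i =>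
    match PySem.List.pyGet? key.toList (PySem.Int.mod i (key.toList.length : Int)) with
    | some c => (c.toNat : Int)
    | none => 0)

-- ===== PRECONDITION & SPEC =====
-- Pre_ excludes only the empty key, on which Python A loops forever (and B raises ZeroDivisionError).
def Pre_rc4_key_process (key : String) : Prop := key ≠ ""
instance (key : String) : Decidable (Pre_rc4_key_process key) := by unfold Pre_rc4_key_process; infer_instance
def pvWitness_rc4_key_process : String := "key"

def Spec_rc4_key_process (key : String) (out : List Int) : Prop := out = rc4_key_process_alt key
instance (key : String) (out : List Int) : Decidable (Spec_rc4_key_process key out) := by unfold Spec_rc4_key_process; infer_instance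

-- ===== CLAIM (what is proved, stated in full; the proofs are below) =====
def Claim_equal_rc4_key_process : Prop := ∀ (key : String), Dom_rc4_key_process key → Pre_rc4_key_process key → Spec_rc4_key_process key (rc4_key_process key)

-- ===== LEMMAS AND PROOFS =====

theorem take_take_append (n : Nat) (L M : List Int) :
    List.take n (List.take n L ++ M) = List.take n (L ++ M) := by
  by_cases h : L.length ≤ n
  · rw [List.take_of_length_le h]
  · have h' : n ≤ L.length := le_of_not_ge h
    rw [List.take_append_of_le_length h',
        List.take_append_of_le_length (by simpa using h'), List.take_take, min_self]

theorem innerA_spec (chars : List Char) :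
    ∀ (result : List Int) (count : Int), result.length < 256 →
      pvInnerA chars result count =
        (List.take 256 (result ++ chars.map (fun c => (c.toNat : Int))),
         count + (min chars.length (256 - result.length) : Nat)) := by
  induction chars with
  | nil =>
      intro result count h
      simp [pvInnerA, List.take_of_length_le (le_of_lt h)]
  | cons c rest ih =>
      intro result count h
      simp only [pvInnerA, List.map_cons]
      by_cases hl : (result ++ [(c.toNat : Int)]).length = 256
      · rw [if_pos hl]
        simp only [List.length_append, List.length_singleton] at hl
        simp only [Prod.mk.injEq]
        constructor
        · rw [show result ++ (c.toNat : Int) :: rest.map (fun c => (c.toNat : Int))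
                = (result ++ [(c.toNat : Int)]) ++ rest.map (fun c => (c.toNat : Int)) by simp,
              List.take_append_of_le_length (by simp [hl]),
              List.take_of_length_le (by simp [hl])]
        · have : min (rest.length + 1) (256 - result.length) = 1 := by omega
          simp only [List.length_cons, this]
          omega
      · rw [if_neg hl]
        have hlen : (result ++ [(c.toNat : Int)]).length < 256 := by
          simp only [List.length_append, List.length_singleton] at hl ⊢
          omega
        rw [ih _ _ hlen]
        simp only [List.length_append, List.length_singleton] at hlen
        simp only [Prod.mk.injEq]
        constructor
        · simp
        · simp only [List.length_cons, List.length_append, List.length_nil]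
          omega

theorem outerA_spec (chars : List Char) (hc : 1 ≤ chars.length) :
    ∀ (fuel : Nat) (result : List Int), result.length ≤ 256 → 256 ≤ result.length + fuel →
      pvOuterA fuel result (result.length : Int) chars =
        List.take 256 (result ++
          (List.replicate fuel (chars.map (fun c => (c.toNat : Int)))).flatten) := by
  intro fuel
  induction fuel with
  | zero =>
      intro result h1 h2
      have h3 : result.length = 256 := by omega
      simp [pvOuterA, List.take_of_length_le (le_of_eq h3)]
  | succ fuel ih =>
      intro result h1 h2
      simp only [pvOuterA]
      by_cases he : (result.length : Int) = 256
      · have h256 : result.length = 256 := by exact_mod_cast he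
        rw [if_pos he, List.take_append_of_le_length (by omega),
            List.take_of_length_le (by omega)]
      · have hlt : result.length < 256 := by
          have : result.length ≠ 256 := fun h => he (by exact_mod_cast h)
          omega
        rw [if_neg he, innerA_spec chars result 0 hlt]
        set ords := chars.map (fun c => (c.toNat : Int)) with hords
        have hno : ords.length = chars.length := by simp [hords]
        set r' := List.take 256 (result ++ ords) with hr'
        have hlr' : r'.length = min 256 (result.length + ords.length) := by
          simp [hr']
        have hstep : (0 + (min chars.length (256 - result.length) : Nat) : Int)
            = ((r'.length : Nat) : Int) - (result.length : Int) := by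
          rw [hlr', hno]; push_cast; omega
        have harg : (result.length : Int) + (0 + (min chars.length (256 - result.length) : Nat))
            = (r'.length : Int) := by rw [hstep]; ring
        rw [harg, ih r' (by omega) (by rw [hlr']; omega)]
        rw [List.replicate_succ, List.flatten_cons, hr', ← List.append_assoc]
        rw [take_take_append]

-- element of the flattened cyclic repetition: position i holds l[i % l.length]
theorem flat_rep_getElem (l : List Int) (_hl : 0 < l.length) :
    ∀ (k i : Nat), i < k * l.length →
      (List.flatten (List.replicate k l))[i]? = l[i % l.length]? := by
  intro k
  induction k with
  | zero => intro i hi; omega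
  | succ k ih =>
      intro i hi
      have hmul : (k + 1) * l.length = k * l.length + l.length := Nat.succ_mul k l.length
      rw [List.replicate_succ, List.flatten_cons]
      by_cases h : i < l.length
      · rw [List.getElem?_append_left h, Nat.mod_eq_of_lt h]
      · have hge : l.length ≤ i := le_of_not_gt h
        rw [List.getElem?_append_right hge, ih (i - l.length) (by omega),
            ← Nat.mod_eq_sub_mod hge]

-- ===== VERDICT (by name: the statement is the Claim_ definition above) =====
theorem rc4_key_process_spec : Claim_equal_rc4_key_process := by
  intro key _ hpre
  unfold Spec_rc4_key_process rc4_key_process rc4_key_process_alt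
  have hne : key.toList ≠ [] := by
    intro a
    apply hpre
    simpa [String.ofList_toList] using congrArg String.ofList a
  have hc : 1 ≤ key.toList.length := by
    cases h : key.toList with
    | nil => exact absurd h hne
    | cons a l => simp
  have hA' : pvOuterA 257 [] 0 key.toList =
      List.take 256 (List.flatten (List.replicate 257 (key.toList.map (fun c => (c.toNat : Int))))) := by
    have h0 := outerA_spec key.toList hc 257 [] (by simp) (by simp)
    rw [List.nil_append] at h0
    exact h0
  rw [hA']
  apply List.ext_getElem?
  intro i
  by_cases hi : i < 256
  · have hflat : i < 257 * (key.toList.map (fun c => (c.toNat : Int))).length := by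
      have h257 : 257 * 1 ≤ 257 * key.toList.length := Nat.mul_le_mul_left 257 hc
      simp only [List.length_map]; omega
    rw [List.getElem?_take_of_lt hi,
        flat_rep_getElem _ (by simp only [List.length_map]; omega) 257 i hflat,
        show (256 : Int) = ((256 : Nat) : Int) from by norm_num,
        PySem.List.getElem?_map_pyRange_zero _ 256 i hi,
        PySem.Int.mod_natCast i key.toList.length, PySem.List.pyGet?_natCast]
    have hlt : i % key.toList.length < key.toList.length := Nat.mod_lt _ (by omega)
    simp only [List.length_map, List.getElem?_map,
        List.getElem?_eq_getElem hlt, Option.map_some]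
  · have h1 : (List.take 256 (List.flatten
        (List.replicate 257 (key.toList.map (fun c => (c.toNat : Int)))))).length ≤ i := by
      simp only [List.length_take]; omega
    have h2 : ((PySem.List.pyRange 0 256 1).map (fun i =>
        match PySem.List.pyGet? key.toList (PySem.Int.mod i (key.toList.length : Int)) with
        | some c => (c.toNat : Int)
        | none => 0)).length ≤ i := by
      simp only [List.length_map, PySem.List.length_pyRange_one]; omega
    rw [List.getElem?_eq_none h1, List.getElem?_eq_none h2]
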